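-- pv_equiv track=rewrite | github.com/nyucel/blm2010 | final/170401073.py | gunleritopla
-- ===== SOURCE A (Python) =====
-- def gunleritopla(n):
--     gunler=[]
--     liste2=[]
--     for i in range(13):
--         gunler.append(0)
--     for i in range(1,len(n)+1):
--         liste2.append(i)
--     for i in range(13):
--         for j in range(len(n)):
--             gunler[i]+=liste2[j]**i
--     return gunler
-- ===== SOURCE B (Python) =====
-- def gunleritopla(n):
--     # Closed form: Faulhaber polynomials S_e(m) = sum_{j=1}^m j^e for e = 0..12,
--     # evaluated at m = len(n); O(1) in the list length instead of O(13*m).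
--     m = len(n)
--     return [
--         m,
--         (m + m**2) // 2,
--         (m + 3*m**2 + 2*m**3) // 6,
--         (m**2 + 2*m**3 + m**4) // 4,
--         (-m + 10*m**3 + 15*m**4 + 6*m**5) // 30,
--         (-m**2 + 5*m**4 + 6*m**5 + 2*m**6) // 12,
--         (m - 7*m**3 + 21*m**5 + 21*m**6 + 6*m**7) // 42,
--         (2*m**2 - 7*m**4 + 14*m**6 + 12*m**7 + 3*m**8) // 24,
--         (-3*m + 20*m**3 - 42*m**5 + 60*m**7 + 45*m**8 + 10*m**9) // 90,
--         (-3*m**2 + 10*m**4 - 14*m**6 + 15*m**8 + 10*m**9 + 2*m**10) // 20,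
--         (5*m - 33*m**3 + 66*m**5 - 66*m**7 + 55*m**9 + 33*m**10 + 6*m**11) // 66,
--         (10*m**2 - 33*m**4 + 44*m**6 - 33*m**8 + 22*m**10 + 12*m**11 + 2*m**12) // 24,
--         (-691*m + 4550*m**3 - 9009*m**5 + 8580*m**7 - 5005*m**9 + 2730*m**11 + 1365*m**12 + 210*m**13) // 2730,
--     ]
-- ===== Notes on version B (the rewrite author's own statement) =====
-- stated objective: faster
-- what changed: Replaced the 13-by-len(n) nested summation loops with the thirteen Faulhaber closed-form polynomials evaluated once at m = len(n) with exact integer floor division.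
import Mathlib
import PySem

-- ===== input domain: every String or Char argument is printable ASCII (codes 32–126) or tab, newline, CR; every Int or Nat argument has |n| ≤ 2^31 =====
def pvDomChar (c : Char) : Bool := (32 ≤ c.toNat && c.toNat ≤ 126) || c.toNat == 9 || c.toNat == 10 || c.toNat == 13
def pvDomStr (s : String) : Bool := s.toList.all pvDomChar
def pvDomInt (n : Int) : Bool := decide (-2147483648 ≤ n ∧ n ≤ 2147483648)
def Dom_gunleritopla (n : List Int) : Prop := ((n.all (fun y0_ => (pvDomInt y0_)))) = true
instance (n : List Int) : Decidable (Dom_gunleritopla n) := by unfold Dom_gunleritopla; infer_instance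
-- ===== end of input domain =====

-- B replaces A's 13×len(n) loop with the thirteen Faulhaber closed-form polynomials
-- evaluated at m = len(n): a different (constant-time in m) algorithm for the same values.

set_option maxRecDepth 4096

-- ===== PORT A =====
-- Indexing: gunler[i] and liste2[j] are only reached with i ∈ range(13), j ∈ range(len(n)),
-- always in range, so the total forms pySetD/pyGetD are exact here; j**i with i ≥ 0 is ^ i.toNat.
def gunleritopla (n : List Int) : List Int :=
  let gunler : List Int := (PySem.List.pyRange 0 13 1).foldl (fun g _ => g ++ [(0:Int)]) []
  let liste2 : List Int := (PySem.List.pyRange 1 ((n.length : Int) + 1) 1).foldl (fun l i => l ++ [i]) []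
  (PySem.List.pyRange 0 13 1).foldl (fun g i =>
    (PySem.List.pyRange 0 (n.length : Int) 1).foldl (fun g j =>
      PySem.List.pySetD g i (PySem.List.pyGetD g i 0 + (PySem.List.pyGetD liste2 j 0) ^ i.toNat)) g) gunler

-- ===== PORT B =====
-- Source B verbatim: m = len(n); the 13 Faulhaber polynomials with Python's exact // (floordiv).
def gunleritopla_alt (n : List Int) : List Int :=
  let m : Int := (n.length : Int)
  [m,
   PySem.Int.floordiv (m + m^2) 2,
   PySem.Int.floordiv (m + 3*m^2 + 2*m^3) 6,
   PySem.Int.floordiv (m^2 + 2*m^3 + m^4) 4,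
   PySem.Int.floordiv (-m + 10*m^3 + 15*m^4 + 6*m^5) 30,
   PySem.Int.floordiv (-m^2 + 5*m^4 + 6*m^5 + 2*m^6) 12,
   PySem.Int.floordiv (m - 7*m^3 + 21*m^5 + 21*m^6 + 6*m^7) 42,
   PySem.Int.floordiv (2*m^2 - 7*m^4 + 14*m^6 + 12*m^7 + 3*m^8) 24,
   PySem.Int.floordiv (-3*m + 20*m^3 - 42*m^5 + 60*m^7 + 45*m^8 + 10*m^9) 90,
   PySem.Int.floordiv (-3*m^2 + 10*m^4 - 14*m^6 + 15*m^8 + 10*m^9 + 2*m^10) 20,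
   PySem.Int.floordiv (5*m - 33*m^3 + 66*m^5 - 66*m^7 + 55*m^9 + 33*m^10 + 6*m^11) 66,
   PySem.Int.floordiv (10*m^2 - 33*m^4 + 44*m^6 - 33*m^8 + 22*m^10 + 12*m^11 + 2*m^12) 24,
   PySem.Int.floordiv (-691*m + 4550*m^3 - 9009*m^5 + 8580*m^7 - 5005*m^9 + 2730*m^11 + 1365*m^12 + 210*m^13) 2730]

-- ===== PRECONDITION & SPEC =====
def Spec_gunleritopla (n : List Int) (out : List Int) : Prop := out = gunleritopla_alt n
instance (n : List Int) (out : List Int) : Decidable (Spec_gunleritopla n out) := by unfold Spec_gunleritopla; infer_instance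

-- ===== CLAIM (what is proved, stated in full; the proofs are below) =====
def Claim_equal_gunleritopla : Prop := ∀ (n : List Int), Dom_gunleritopla n → Spec_gunleritopla n (gunleritopla n)

-- ===== LEMMAS AND PROOFS =====

-- the common value: pvS m e = 1^e + 2^e + … + m^e
def pvS (m : Nat) (e : Nat) : Int :=
  ((PySem.List.pyRange 1 ((m:Int)+1) 1).map (fun x => x ^ e)).sum

-- an integer polynomial evaluated at m (the shape shared by B's entries)
def pvP (f : Int → Int) (m : Nat) : Int := f (m : Int)

-- A's inner loop: repeatedly bumping cell i accumulates the sum of the bumps into cell i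
lemma innerA (L : List Int) (c : Int → Int) (i : Nat) (g : List Int) :
    L.foldl (fun g j => g.set i (g.getD i 0 + c j)) g
      = g.set i (g.getD i 0 + (L.map c).sum) := by
  induction L generalizing g with
  | nil =>
    rw [List.foldl_nil, List.map_nil, List.sum_nil, add_zero]
    by_cases h : i < g.length
    · rw [List.getD_eq_getElem?_getD, List.getElem?_eq_getElem h,
        Option.getD_some, List.set_getElem_self h]
    · rw [List.set_eq_of_length_le (by omega)]
  | cons a L ih =>
    simp only [List.foldl_cons, List.map_cons, List.sum_cons, ih]
    by_cases h : i < g.length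
    · rw [show (g.set i (g.getD i 0 + c a)).getD i 0
            = g.getD i 0 + c a by
          rw [List.getD_eq_getElem?_getD, List.getElem?_set_self (by simpa using h),
            Option.getD_some],
        List.set_set, add_assoc]
    · simp only [List.set_eq_of_length_le (by omega : g.length ≤ i)]

-- summing f(xs[j]) over j in range(len(xs)) is summing f over xs
lemma sumIdx (xs : List Int) (e : Nat) :
    ((PySem.List.pyRange 0 (xs.length : Int) 1).map
        (fun j => PySem.List.pyGetD xs j 0 ^ e)).sum
      = (xs.map (fun x => x ^ e)).sum := by
  rw [show (fun j => PySem.List.pyGetD xs j 0 ^ e)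
        = (fun x => x ^ e) ∘ (fun j => PySem.List.pyGetD xs j 0) from rfl,
     ← List.map_map, PySem.List.map_pyGetD_pyRange_zero']

lemma A_char (n : List Int) :
    gunleritopla n = [pvS n.length 0, pvS n.length 1, pvS n.length 2, pvS n.length 3,
      pvS n.length 4, pvS n.length 5, pvS n.length 6, pvS n.length 7, pvS n.length 8,
      pvS n.length 9, pvS n.length 10, pvS n.length 11, pvS n.length 12] := by
  unfold gunleritopla
  simp only []
  rw [PySem.List.foldl_append_singleton, List.nil_append]
  rw [show (PySem.List.pyRange 0 13 1).foldl (fun g _ => g ++ [(0:Int)]) []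
        = List.replicate 13 0 from by decide]
  set m : Int := (n.length : Int) with hm
  set liste2 := PySem.List.pyRange 1 (m + 1) 1 with hl
  have hlen : liste2.length = n.length := by
    rw [hl, PySem.List.length_pyRange_one]; omega
  have hstep : ∀ (g : List Int) (i : Int), i ∈ PySem.List.pyRange 0 13 1 →
      (PySem.List.pyRange 0 m 1).foldl (fun g j =>
        PySem.List.pySetD g i (PySem.List.pyGetD g i 0 + (PySem.List.pyGetD liste2 j 0) ^ i.toNat)) g
      = g.set i.toNat (g.getD i.toNat 0 + pvS n.length i.toNat) := by
    intro g i hi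
    have hi0 : 0 ≤ i := by
      rw [PySem.List.mem_pyRange_one] at hi; omega
    have hconv : ∀ (g' : List Int) (j : Int),
        PySem.List.pySetD g' i (PySem.List.pyGetD g' i 0 + (PySem.List.pyGetD liste2 j 0) ^ i.toNat)
          = g'.set i.toNat (g'.getD i.toNat 0 + (PySem.List.pyGetD liste2 j 0) ^ i.toNat) := by
      intro g' j
      rw [PySem.List.pySetD_of_nonneg _ _ hi0, PySem.List.pyGetD_of_nonneg _ _ hi0]
    simp only [hconv]
    rw [innerA (PySem.List.pyRange 0 m 1) (fun j => (PySem.List.pyGetD liste2 j 0) ^ i.toNat) i.toNat g]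
    congr 2
    rw [show m = (liste2.length : Int) by rw [hlen, hm], sumIdx liste2 i.toNat, hl, pvS, hm]
  rw [PySem.List.foldl_congr_mem _ _ _ _ hstep]
  rw [show PySem.List.pyRange 0 13 1 = [0,1,2,3,4,5,6,7,8,9,10,11,12] from by decide]
  show [0 + pvS n.length 0, 0 + pvS n.length 1, 0 + pvS n.length 2, 0 + pvS n.length 3,
    0 + pvS n.length 4, 0 + pvS n.length 5, 0 + pvS n.length 6, 0 + pvS n.length 7,
    0 + pvS n.length 8, 0 + pvS n.length 9, 0 + pvS n.length 10, 0 + pvS n.length 11,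
    0 + pvS n.length 12] = _
  simp

lemma pvS_zero (e : Nat) : pvS 0 e = 0 := by
  unfold pvS
  rw [show ((0:Nat):Int) + 1 = 1 by norm_num, PySem.List.pyRange_one_eq_nil le_rfl]
  simp

lemma pvS_succ (m : Nat) (e : Nat) :
    pvS (m + 1) e = pvS m e + ((m : Int) + 1) ^ e := by
  unfold pvS
  rw [show (((m + 1 : Nat) : Int) + 1) = (((m : Int) + 1) + 1) by push_cast; ring,
    PySem.List.pyRange_one_succ_right (by omega), List.map_append, List.sum_append]
  simp

-- exact division: when the dividend is d·s with d > 0, Python's // returns s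
lemma fd_cancel (d s : Int) (h : 0 < d) : PySem.Int.floordiv (d * s) d = s := by
  rw [PySem.Int.floordiv_eq_ediv_of_pos h]
  exact Int.mul_ediv_cancel_left s (by omega)

-- each Faulhaber polynomial equals its denominator times the power sum (induction on m)
lemma pvF_0 : ∀ (m : Nat), ((m:Int)) = 1 * pvS m 0 := by
  intro m
  induction m with
  | zero => simp [pvS_zero]
  | succ k ih =>
    rw [pvS_succ, mul_add, ← ih]
    push_cast
    ring

lemma pvF_1 : ∀ (m : Nat), ((m:Int) + (m:Int)^2) = 2 * pvS m 1 := by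
  intro m
  induction m with
  | zero => simp [pvS_zero]
  | succ k ih =>
    rw [pvS_succ, mul_add, ← ih]
    push_cast
    ring

lemma pvF_2 : ∀ (m : Nat), ((m:Int) + 3*(m:Int)^2 + 2*(m:Int)^3) = 6 * pvS m 2 := by
  intro m
  induction m with
  | zero => simp [pvS_zero]
  | succ k ih =>
    rw [pvS_succ, mul_add, ← ih]
    push_cast
    ring

lemma pvF_3 : ∀ (m : Nat), ((m:Int)^2 + 2*(m:Int)^3 + (m:Int)^4) = 4 * pvS m 3 := by
  intro m
  induction m with
  | zero => simp [pvS_zero]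
  | succ k ih =>
    rw [pvS_succ, mul_add, ← ih]
    push_cast
    ring

lemma pvF_4 : ∀ (m : Nat), (-(m:Int) + 10*(m:Int)^3 + 15*(m:Int)^4 + 6*(m:Int)^5) = 30 * pvS m 4 := by
  intro m
  induction m with
  | zero => simp [pvS_zero]
  | succ k ih =>
    rw [pvS_succ, mul_add, ← ih]
    push_cast
    ring

lemma pvF_5 : ∀ (m : Nat), (-(m:Int)^2 + 5*(m:Int)^4 + 6*(m:Int)^5 + 2*(m:Int)^6) = 12 * pvS m 5 := by
  intro m
  induction m with
  | zero => simp [pvS_zero]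
  | succ k ih =>
    rw [pvS_succ, mul_add, ← ih]
    push_cast
    ring

lemma pvF_6 : ∀ (m : Nat), ((m:Int) - 7*(m:Int)^3 + 21*(m:Int)^5 + 21*(m:Int)^6 + 6*(m:Int)^7) = 42 * pvS m 6 := by
  intro m
  induction m with
  | zero => simp [pvS_zero]
  | succ k ih =>
    rw [pvS_succ, mul_add, ← ih]
    push_cast
    ring

lemma pvF_7 : ∀ (m : Nat), (2*(m:Int)^2 - 7*(m:Int)^4 + 14*(m:Int)^6 + 12*(m:Int)^7 + 3*(m:Int)^8) = 24 * pvS m 7 := by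
  intro m
  induction m with
  | zero => simp [pvS_zero]
  | succ k ih =>
    rw [pvS_succ, mul_add, ← ih]
    push_cast
    ring

lemma pvF_8 : ∀ (m : Nat), (-3*(m:Int) + 20*(m:Int)^3 - 42*(m:Int)^5 + 60*(m:Int)^7 + 45*(m:Int)^8 + 10*(m:Int)^9) = 90 * pvS m 8 := by
  intro m
  induction m with
  | zero => simp [pvS_zero]
  | succ k ih =>
    rw [pvS_succ, mul_add, ← ih]
    push_cast
    ring

lemma pvF_9 : ∀ (m : Nat), (-3*(m:Int)^2 + 10*(m:Int)^4 - 14*(m:Int)^6 + 15*(m:Int)^8 + 10*(m:Int)^9 + 2*(m:Int)^10) = 20 * pvS m 9 := by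
  intro m
  induction m with
  | zero => simp [pvS_zero]
  | succ k ih =>
    rw [pvS_succ, mul_add, ← ih]
    push_cast
    ring

lemma pvF_10 : ∀ (m : Nat), (5*(m:Int) - 33*(m:Int)^3 + 66*(m:Int)^5 - 66*(m:Int)^7 + 55*(m:Int)^9 + 33*(m:Int)^10 + 6*(m:Int)^11) = 66 * pvS m 10 := by
  intro m
  induction m with
  | zero => simp [pvS_zero]
  | succ k ih =>
    rw [pvS_succ, mul_add, ← ih]
    push_cast
    ring

lemma pvF_11 : ∀ (m : Nat), (10*(m:Int)^2 - 33*(m:Int)^4 + 44*(m:Int)^6 - 33*(m:Int)^8 + 22*(m:Int)^10 + 12*(m:Int)^11 + 2*(m:Int)^12) = 24 * pvS m 11 := by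
  intro m
  induction m with
  | zero => simp [pvS_zero]
  | succ k ih =>
    rw [pvS_succ, mul_add, ← ih]
    push_cast
    ring

lemma pvF_12 : ∀ (m : Nat), (-691*(m:Int) + 4550*(m:Int)^3 - 9009*(m:Int)^5 + 8580*(m:Int)^7 - 5005*(m:Int)^9 + 2730*(m:Int)^11 + 1365*(m:Int)^12 + 210*(m:Int)^13) = 2730 * pvS m 12 := by
  intro m
  induction m with
  | zero => simp [pvS_zero]
  | succ k ih =>
    rw [pvS_succ, mul_add, ← ih]
    push_cast
    ring

lemma B_char (n : List Int) :
    gunleritopla_alt n = [pvS n.length 0, pvS n.length 1, pvS n.length 2, pvS n.length 3,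
      pvS n.length 4, pvS n.length 5, pvS n.length 6, pvS n.length 7, pvS n.length 8,
      pvS n.length 9, pvS n.length 10, pvS n.length 11, pvS n.length 12] := by
  simp only [gunleritopla_alt]
  rw [pvF_1, pvF_2, pvF_3, pvF_4, pvF_5, pvF_6, pvF_7, pvF_8, pvF_9, pvF_10, pvF_11, pvF_12]
  rw [fd_cancel _ _ (show (0:Int) < 2 by norm_num), fd_cancel _ _ (show (0:Int) < 6 by norm_num),
    fd_cancel _ _ (show (0:Int) < 4 by norm_num), fd_cancel _ _ (show (0:Int) < 30 by norm_num),
    fd_cancel _ _ (show (0:Int) < 12 by norm_num), fd_cancel _ _ (show (0:Int) < 42 by norm_num),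
    fd_cancel _ _ (show (0:Int) < 24 by norm_num), fd_cancel _ _ (show (0:Int) < 90 by norm_num),
    fd_cancel _ _ (show (0:Int) < 20 by norm_num), fd_cancel _ _ (show (0:Int) < 66 by norm_num),
    fd_cancel _ _ (show (0:Int) < 24 by norm_num), fd_cancel _ _ (show (0:Int) < 2730 by norm_num)]
  rw [show ((n.length : Int)) = 1 * pvS n.length 0 from pvF_0 n.length, one_mul]

-- ===== VERDICT (by name: the statement is the Claim_ definition above) =====
theorem gunleritopla_spec : Claim_equal_gunleritopla := by
  intro n _
  unfold Spec_gunleritopla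
  rw [A_char, B_char]
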